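-- pv_equiv track=rewrite | github.com/HUICHIEHCHEN/SC_Projects | Projects/boggle_game/boggle.py | check
-- ===== SOURCE A (Python) =====
-- def check(s):
-- 	"""
-- 	This function checks if input follow the rules:
-- 	1. contains 4 letters
-- 	2. there is a space between each letter
--
-- 	:param s: str, a row of letters input by user
-- 	:return: bool, if input meets the rules
-- 	"""
-- 	if len(s) < 7:
-- 		return False
-- 	elif 7 <= len(s) <= 8:
-- 		for i in range(len(s)):
-- 			if i % 2 == 1 and s[i] != ' ':			# If no space between each letter
-- 				return False
-- 			elif i % 2 == 0 and s[i].isspace():		# If less than 4 letters but with many spaces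
-- 				return False
-- 		return True
-- ===== SOURCE B (Python) =====
-- def _ok(s):
--     """Consume the string two characters at a time: a non-space letter, then a ' ' separator."""
--     if not s:
--         return True
--     if s[0].isspace():
--         return False
--     return len(s) == 1 or (s[1] == ' ' and _ok(s[2:]))
--
--
-- def check(s):
--     if len(s) < 7:
--         return False
--     if len(s) <= 8:
--         return _ok(s)
--     # len(s) > 8: fall through (implicit None), as specified
--
--
-- def _main_test():
--     pass
-- ===== Notes on version B (the rewrite author's own statement) =====
-- stated objective: simpler
-- what changed: Replaced the indexed loop with parity tests (i % 2) by a recursive helper that consumes the string two characters at a time (a non-space letter, then a ' ' separator), eliminating index arithmetic.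
import Mathlib
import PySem

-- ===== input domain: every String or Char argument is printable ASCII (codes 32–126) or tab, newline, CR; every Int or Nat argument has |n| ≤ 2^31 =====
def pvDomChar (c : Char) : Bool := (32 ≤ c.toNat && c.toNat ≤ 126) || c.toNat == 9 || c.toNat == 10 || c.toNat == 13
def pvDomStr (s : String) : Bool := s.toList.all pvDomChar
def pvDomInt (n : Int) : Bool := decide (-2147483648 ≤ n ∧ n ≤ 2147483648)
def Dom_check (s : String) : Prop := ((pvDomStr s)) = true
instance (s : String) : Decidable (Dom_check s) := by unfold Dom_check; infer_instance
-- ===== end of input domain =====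

-- ===== PORT A =====
-- A's for-loop over range(len(s)): recursion over the characters in order, carrying the index i.
def checkLoop : List Char → Nat → Bool
  | [], _ => true
  | c :: t, i =>
    if i % 2 == 1 && c != ' ' then false
    else if i % 2 == 0 && PySem.Chars.isspace c then false
    else checkLoop t (i + 1)

def check (s : String) : Option Bool :=
  if PySem.Str.len s < 7 then some false
  else if 7 ≤ PySem.Str.len s ∧ PySem.Str.len s ≤ 8 then some (checkLoop s.toList 0)
  else none

-- ===== PORT B =====
-- B's recursive helper _ok: consume two characters at a time (letter, then ' ' separator).
def okB : List Char → Bool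
  | [] => true
  | [c] => !PySem.Chars.isspace c
  | c :: d :: t =>
    if PySem.Chars.isspace c then false
    else d == ' ' && okB t

def check_alt (s : String) : Option Bool :=
  if PySem.Str.len s < 7 then some false
  else if PySem.Str.len s ≤ 8 then some (okB s.toList)
  else none

-- ===== PRECONDITION & SPEC =====
def Spec_check (s : String) (out : Option Bool) : Prop := out = check_alt s
instance (s : String) (out : Option Bool) : Decidable (Spec_check s out) := by unfold Spec_check; infer_instance

-- ===== CLAIM (what is proved, stated in full; the proofs are below) =====
def Claim_equal_check : Prop := ∀ (s : String), Dom_check s → Spec_check s (check s)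

-- ===== LEMMAS AND PROOFS =====

-- A's loop only ever consults the parity of the index.
theorem checkLoop_parity (cs : List Char) (i : Nat) : checkLoop cs (i + 2) = checkLoop cs i := by
  induction cs generalizing i with
  | nil => rfl
  | cons c t ih =>
    simp only [checkLoop, Nat.add_mod_right]
    have : i + 2 + 1 = (i + 1) + 2 := by omega
    rw [this, ih]

theorem checkLoop_eq_okB (cs : List Char) : checkLoop cs 0 = okB cs := by
  induction cs using okB.induct with
  | case1 => rfl
  | case2 c => simp [checkLoop, okB]
  | case3 c d t hc => simp [checkLoop, okB, hc]
  | case4 c d t hc ih =>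
    by_cases hd : d = ' '
    · subst hd
      have h2 : (0 : Nat) + 1 + 1 = 0 + 2 := by omega
      simp [checkLoop, okB, hc, h2, checkLoop_parity, ih]
    · simp [checkLoop, okB, hc, hd]

-- ===== VERDICT (by name: the statement is the Claim_ definition above) =====
theorem check_spec : Claim_equal_check := by
  intro s _
  unfold Spec_check check check_alt
  have hlen := PySem.Str.len_eq s
  split_ifs with h1 h2 h3 h4 <;> first
    | rfl
    | exact congrArg some (checkLoop_eq_okB s.toList)
    | omega
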